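-- pv_equiv track=rewrite | github.com/einnerin/kartonki | apply_topics.py | generate_name_map
-- ===== SOURCE A (Python) =====
-- from collections import defaultdict
--
-- LEVEL_WORDS = {1: "основы", 2: "продвинутый", 3: "профессиональный"}
--
-- def generate_name_map(topic_map):
--     """Assign sequential names within each (topic, level) group."""
--     groups = defaultdict(list)
--     for sid, (topic, level) in topic_map.items():
--         groups[(topic, level)].append(sid)
--
--     name_map = {}
--     for (topic, level), sids in groups.items():
--         base = f"{topic}: {LEVEL_WORDS[level]}"
--         for i, sid in enumerate(sorted(sids)):
--             name_map[sid] = base if i == 0 else f"{base} {i + 1}"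
--     return name_map
-- ===== SOURCE B (Python) =====
-- LEVEL_WORDS = {1: "основы", 2: "продвинутый", 3: "профессиональный"}
--
-- def generate_name_map(topic_map):
--     """Assign sequential names within each (topic, level) group."""
--     name_map = {}
--     for key in dict.fromkeys(topic_map.values()):
--         topic, level = key
--         base = f"{topic}: {LEVEL_WORDS[level]}"
--         sids = sorted(s for s, tl in topic_map.items() if tl == key)
--         names = [base] + [f"{base} {n}" for n in range(2, len(sids) + 1)]
--         name_map.update(zip(sids, names))
--     return name_map
-- ===== Notes on version B (the rewrite author's own statement) =====
-- stated objective: alternative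
-- what changed: A builds a defaultdict of per-(topic,level) sid lists in one pass and then loops over the groups with enumerate; B never builds a groups dict: it walks the distinct (topic, level) keys (dict.fromkeys of the values), re-scans topic_map with a filter per key, builds the whole name list by a range comprehension and installs it with one update(zip(...)).
import Mathlib
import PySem

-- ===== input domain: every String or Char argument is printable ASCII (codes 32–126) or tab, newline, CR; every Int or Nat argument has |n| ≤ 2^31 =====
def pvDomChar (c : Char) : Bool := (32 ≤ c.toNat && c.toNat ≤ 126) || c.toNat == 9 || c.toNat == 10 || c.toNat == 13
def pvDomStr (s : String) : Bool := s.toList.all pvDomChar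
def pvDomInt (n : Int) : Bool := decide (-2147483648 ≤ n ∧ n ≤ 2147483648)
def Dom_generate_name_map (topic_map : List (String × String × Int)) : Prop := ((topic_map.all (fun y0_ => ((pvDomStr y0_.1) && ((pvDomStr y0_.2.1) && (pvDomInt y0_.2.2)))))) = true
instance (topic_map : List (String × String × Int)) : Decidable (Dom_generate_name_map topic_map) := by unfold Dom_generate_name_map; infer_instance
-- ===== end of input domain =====

-- B replaces A's defaultdict grouping pass by a walk over the distinct (topic, level) keys,
-- filtering topic_map per key and installing each group's names with one update(zip(...)): an
-- alternative decomposition of the same task (no speed claim).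


def LEVEL_WORDS : PySem.Dict Int String :=
  PySem.Dict.ofList [(1, "основы"), (2, "продвинутый"), (3, "профессиональный")]

-- ===== PORT A =====
-- LEVEL_WORDS[level] raises KeyError for level ∉ {1,2,3}; those inputs are excluded by
-- Pre_generate_name_map, so the total form getD is only evaluated where the key exists.
def generate_name_map (topic_map : List (String × String × Int)) : List (String × String) :=
  let groups : PySem.Dict (String × Int) (List String) :=
    topic_map.foldl (fun g p => g.modify (p.2.1, p.2.2) [] (fun l => l ++ [p.1]))
      PySem.Dict.empty
  let name_map : PySem.Dict String String :=
    groups.items.foldl (fun nm kv =>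
      let base := kv.1.1 ++ ": " ++ LEVEL_WORDS.getD kv.1.2 ""
      (PySem.List.enumerate (PySem.List.sorted kv.2 (fun s => s) false) 0).foldl
        (fun nm is =>
          nm.insert is.2 (if is.1 == 0 then base else base ++ " " ++ PySem.Int.toStr (is.1 + 1)))
        nm)
      PySem.Dict.empty
  name_map.items

-- ===== PORT B =====
def generate_name_map_alt (topic_map : List (String × String × Int)) : List (String × String) :=
  let name_map : PySem.Dict String String :=
    (PySem.List.dedup (topic_map.map (fun p => p.2))).foldl (fun nm key =>
      let base := key.1 ++ ": " ++ LEVEL_WORDS.getD key.2 ""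
      let sids := PySem.List.sorted
        ((topic_map.filter (fun p => p.2 == key)).map (fun p => p.1)) (fun s => s) false
      let names := [base] ++ (PySem.List.pyRange 2 ((sids.length : Int) + 1) 1).map
        (fun n => base ++ " " ++ PySem.Int.toStr n)
      nm.update (sids.zip names))
      PySem.Dict.empty
  name_map.items

-- ===== PRECONDITION & SPEC =====
-- Pre_ excludes exactly the inputs on which A raises KeyError: an entry whose level is not a
-- key of LEVEL_WORDS (i.e. not 1, 2 or 3).
def Pre_generate_name_map (topic_map : List (String × String × Int)) : Prop :=
  ∀ p ∈ topic_map, p.2.2 = 1 ∨ p.2.2 = 2 ∨ p.2.2 = 3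
instance (topic_map : List (String × String × Int)) : Decidable (Pre_generate_name_map topic_map) := by
  unfold Pre_generate_name_map; infer_instance

def pvWitness_generate_name_map : (List (String × String × Int)) :=
  [("a1", "math", 1), ("b2", "math", 1), ("c3", "art", 2)]

def Spec_generate_name_map (topic_map : List (String × String × Int)) (out : List (String × String)) : Prop := out = generate_name_map_alt topic_map
instance (topic_map : List (String × String × Int)) (out : List (String × String)) : Decidable (Spec_generate_name_map topic_map out) := by unfold Spec_generate_name_map; infer_instance

-- ===== CLAIM (what is proved, stated in full; the proofs are below) =====
def Claim_equal_generate_name_map : Prop := ∀ (topic_map : List (String × String × Int)), Dom_generate_name_map topic_map → Pre_generate_name_map topic_map → Spec_generate_name_map topic_map (generate_name_map topic_map)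

-- ===== LEMMAS AND PROOFS =====

-- enumerate-with-offset, mapped to (value, F index), is a zip against a mapped range
lemma enum_map_zip {α β : Type} (F : Int → β) (ss : List α) :
    ∀ s : Int, (PySem.List.enumerate ss s).map (fun is => (is.2, F is.1))
      = ss.zip ((PySem.List.pyRange s (s + ss.length) 1).map F) := by
  induction ss with
  | nil => intro s; simp [PySem.List.enumerate]
  | cons x t ih =>
    intro s
    have hb : s + ((x :: t).length : Int) = (s + 1) + (t.length : Int) := by
      simp only [List.length_cons]; push_cast; omega
    have h : s < s + ((x :: t).length : Int) := by
      simp only [List.length_cons]; push_cast; omega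
    rw [PySem.List.enumerate_cons, PySem.List.pyRange_one_cons h, hb]
    simp only [List.map_cons, List.zip_cons_cons]
    rw [ih (s + 1)]

-- A's inner enumerate loop is B's update(zip(sids, names))
lemma inner_eq (base : String) (ss : List String) (nm : PySem.Dict String String) :
    (PySem.List.enumerate ss 0).foldl
      (fun nm is =>
        nm.insert is.2 (if is.1 == 0 then base else base ++ " " ++ PySem.Int.toStr (is.1 + 1)))
      nm
    = nm.update (ss.zip ([base] ++ (PySem.List.pyRange 2 ((ss.length : Int) + 1) 1).map
        (fun n => base ++ " " ++ PySem.Int.toStr n))) := by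
  have key : (PySem.List.enumerate ss 0).map
      (fun is => (is.2, if is.1 == 0 then base else base ++ " " ++ PySem.Int.toStr (is.1 + 1)))
      = ss.zip ([base] ++ (PySem.List.pyRange 2 ((ss.length : Int) + 1) 1).map
        (fun n => base ++ " " ++ PySem.Int.toStr n)) := by
    cases ss with
    | nil => simp [PySem.List.enumerate]
    | cons x t =>
      rw [enum_map_zip (fun i => if i == 0 then base
            else base ++ " " ++ PySem.Int.toStr (i + 1)) (x :: t) 0]
      have h : (0 : Int) < 0 + ((x :: t).length : Int) := by simp
      have e1 : (0 : Int) + ((x :: t).length : Int) = (t.length : Int) + 1 := by simp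
      rw [PySem.List.pyRange_one_cons h, e1]
      simp only [List.map_cons, List.cons_append, List.nil_append, List.length_cons]
      congr 2
      have ha : (0 : Int) + 1 = 1 := by norm_num
      have hb : ((t.length + 1 : Nat) : Int) + 1 = ((t.length : Int) + 1) + 1 := by
        push_cast; ring
      have hr1 : PySem.List.pyRange 1 ((t.length : Int) + 1) 1
          = (List.range t.length).map (fun k : Nat => ((1 : Int) + (k : Int))) := by
        rw [PySem.List.pyRange_one,
          show (((t.length : Int) + 1) - 1).toNat = t.length from by omega]
      have hr2 : PySem.List.pyRange 2 (((t.length : Int) + 1) + 1) 1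
          = (List.range t.length).map (fun k : Nat => ((2 : Int) + (k : Int))) := by
        rw [PySem.List.pyRange_one,
          show ((((t.length : Int) + 1) + 1) - 2).toNat = t.length from by omega]
      rw [ha, hb, hr1, hr2, List.map_map, List.map_map]
      apply List.map_congr_left
      intro k _
      have hne : ¬ (((1 : Int) + (k : Int) == 0) = true) := by simp only [beq_iff_eq]; omega
      have harg : (1 : Int) + (k : Int) + 1 = 2 + (k : Int) := by omega
      simp only [Function.comp, if_neg hne, harg]
  calc (PySem.List.enumerate ss 0).foldl
        (fun nm is =>
          nm.insert is.2 (if is.1 == 0 then base else base ++ " " ++ PySem.Int.toStr (is.1 + 1)))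
        nm
      = ((PySem.List.enumerate ss 0).map
          (fun is => (is.2, if is.1 == 0 then base
            else base ++ " " ++ PySem.Int.toStr (is.1 + 1)))).foldl
          (fun nm p => nm.insert p.1 p.2) nm := by
        rw [List.foldl_map]
    _ = _ := by rw [key]; rfl

-- the defaultdict grouping pass, characterised: dedup'd keys, each with its filtered sids
lemma groups_items (tm : List (String × String × Int)) :
    (tm.foldl (fun g p => g.modify (p.2.1, p.2.2) [] (fun l => l ++ [p.1]))
      (PySem.Dict.empty : PySem.Dict (String × Int) (List String))).items
    = (PySem.List.dedup (tm.map (fun p => p.2))).map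
        (fun k => (k, (tm.filter (fun p => p.2 == k)).map (fun p => p.1))) := by
  have heta : (tm.foldl (fun g p => g.modify (p.2.1, p.2.2) [] (fun l => l ++ [p.1]))
      (PySem.Dict.empty : PySem.Dict (String × Int) (List String)))
      = tm.foldl (fun g p => g.modify p.2 [] (fun l => l ++ [p.1])) PySem.Dict.empty := by
    simp
  rw [heta]
  have hnodup : (tm.foldl (fun g p => g.modify p.2 [] (fun l => l ++ [p.1]))
      (PySem.Dict.empty : PySem.Dict (String × Int) (List String))).keys.Nodup := by
    apply PySem.Dict.nodup_keys_foldl_modify_key tm (fun p => p.2) [] (fun _ p l => l ++ [p.1])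
    simp [PySem.Dict.keys_empty]
  have hkeys : (tm.foldl (fun g p => g.modify p.2 [] (fun l => l ++ [p.1]))
      (PySem.Dict.empty : PySem.Dict (String × Int) (List String))).keys
      = PySem.List.dedup (tm.map (fun p => p.2)) := by
    rw [PySem.Dict.keys_foldl_modify_key tm (fun p => p.2) [] (fun _ p l => l ++ [p.1])]
    simp [PySem.Set.update, PySem.List.dedup, PySem.Set.ofList, PySem.Dict.keys_empty]
  rw [PySem.Dict.items_eq_map_keys _ hnodup [], hkeys]
  apply List.map_congr_left
  intro k _
  have hfold : tm.foldl (fun g p => g.modify p.2 [] (fun l => l ++ [p.1]))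
      (PySem.Dict.empty : PySem.Dict (String × Int) (List String))
      = (tm.map (fun p => (p.2, p.1))).foldl
          (fun d q => d.modify q.1 [] (fun l => l ++ [q.2])) PySem.Dict.empty := by
    rw [List.foldl_map]
  rw [hfold, PySem.Dict.getD_foldl_modify_append]
  simp [List.filter_map, List.map_map, Function.comp_def]

-- ===== VERDICT (by name: the statement is the Claim_ definition above) =====
theorem generate_name_map_spec : Claim_equal_generate_name_map := by
  intro tm _ _
  unfold Spec_generate_name_map generate_name_map generate_name_map_alt
  dsimp only
  rw [groups_items, List.foldl_map]
  congr 1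
  apply PySem.List.foldl_congr_mem
  intro nm k _
  dsimp only
  rw [inner_eq]
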